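-- pv_equiv track=rewrite | github.com/ahm1844/citespine | src/ingest/document_analyzer.py | _pick_spans
-- ===== SOURCE A (Python) =====
-- from typing import Any, Dict, List, Tuple, Optional, Type
--
-- def _pick_spans(full_text: str, chunks: List[Dict[str, Any]], budget_chars: int) -> str:
--     # Favor anchor-dense spans
--     joiner = "\n\n---\n\n"
--     ranked = sorted(chunks, key=lambda c: sum(term in c.get("text","").lower() for term in (" shall "," must "," required ")), reverse=True)
--     cat = []
--     cur = 0
--     for ch in ranked:
--         t = ch.get("text","").strip()
--         if not t: continue
--         if cur + len(t) + len(joiner) > budget_chars: break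
--         cat.append(t); cur += len(t) + len(joiner)
--     if not cat:
--         return full_text[:budget_chars]
--     return joiner.join(cat)
-- ===== SOURCE B (Python) =====
-- def _pick_spans(full_text, chunks, budget_chars):
--     # Bucket chunks by anchor score (0..3) in one pass instead of sorting,
--     # then concatenate buckets high-to-low (stable) and greedily pack.
--     joiner = "\n\n---\n\n"
--     buckets = [[], [], [], []]
--     for ch in chunks:
--         low = ch.get("text", "").lower()
--         score = sum(term in low for term in (" shall ", " must ", " required "))
--         buckets[score].append(ch)
--     pieces = []
--     for score in (3, 2, 1, 0):
--         for ch in buckets[score]: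
--             t = ch.get("text", "").strip()
--             if t:
--                 pieces.append(t)
--     cat = []
--     cur = 0
--     for t in pieces:
--         if cur + len(t) + len(joiner) > budget_chars:
--             break
--         cat.append(t)
--         cur += len(t) + len(joiner)
--     if not cat:
--         return full_text[:budget_chars]
--     return joiner.join(cat)
-- ===== Notes on version B (the rewrite author's own statement) =====
-- stated objective: alternative
-- what changed: Replaces the comparison sort over chunks by a single-pass bucketing on the anchor score (an integer in 0..3), concatenating buckets high-to-low to reproduce the stable reverse sort, then packs pre-stripped nonempty pieces greedily.
import Mathlib
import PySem

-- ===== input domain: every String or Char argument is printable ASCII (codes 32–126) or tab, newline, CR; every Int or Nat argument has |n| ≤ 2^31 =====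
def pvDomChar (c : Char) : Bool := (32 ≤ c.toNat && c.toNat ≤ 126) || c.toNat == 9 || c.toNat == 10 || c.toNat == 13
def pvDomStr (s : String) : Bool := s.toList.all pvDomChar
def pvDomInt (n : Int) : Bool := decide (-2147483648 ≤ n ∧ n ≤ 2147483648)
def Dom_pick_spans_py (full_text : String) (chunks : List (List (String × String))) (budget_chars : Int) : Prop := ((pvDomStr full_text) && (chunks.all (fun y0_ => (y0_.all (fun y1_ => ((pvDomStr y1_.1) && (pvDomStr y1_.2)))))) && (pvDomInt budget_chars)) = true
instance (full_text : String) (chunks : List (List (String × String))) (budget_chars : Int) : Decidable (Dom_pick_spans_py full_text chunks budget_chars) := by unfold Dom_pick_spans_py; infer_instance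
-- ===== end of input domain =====

-- B replaces A's comparison sort of chunks by one-pass bucketing on the anchor score (0..3); same packing behaviour, proved equal on all inputs.


-- ===== PORT A =====
-- key of A's sorted: sum(term in c.get("text","").lower() for term in (" shall "," must "," required "))
def scoreA (c : List (String × String)) : Int :=
  (([" shall ", " must ", " required "] : List String).map
    (fun term => if PySem.Str.isIn term (PySem.Str.lower (PySem.Dict.getD (PySem.Dict.mk c) "text" "")) then (1:Int) else 0)).sum

-- A's greedy loop: skip empty stripped text, break on first budget overflow, accumulate cat/cur
def packA (budget jlen : Int) : List (List (String × String)) → List String → Int → List String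
  | [], cat, _ => cat
  | ch :: rest, cat, cur =>
      let t := PySem.Str.strip (PySem.Dict.getD (PySem.Dict.mk ch) "text" "")
      if t = "" then packA budget jlen rest cat cur
      else if budget < cur + PySem.Str.len t + jlen then cat
      else packA budget jlen rest (cat ++ [t]) (cur + PySem.Str.len t + jlen)

def pick_spans_py (full_text : String) (chunks : List (List (String × String))) (budget_chars : Int) : String :=
  let joiner := "\n\n---\n\n"
  let ranked := PySem.List.sorted chunks scoreA true
  let cat := packA budget_chars (PySem.Str.len joiner) ranked [] 0
  if cat = [] then PySem.Str.slice full_text none (some budget_chars)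
  else PySem.Str.join joiner cat

-- ===== PORT B =====
-- B's key: lower() computed once per chunk
def scoreB (c : List (String × String)) : Int :=
  let low := PySem.Str.lower (PySem.Dict.getD (PySem.Dict.mk c) "text" "")
  (([" shall ", " must ", " required "] : List String).map
    (fun term => if PySem.Str.isIn term low then (1:Int) else 0)).sum

-- one bucketing step: append the chunk to buckets[score]
def stepB (b : List (List (String × String)) × List (List (String × String)) × List (List (String × String)) × List (List (String × String)))
    (ch : List (String × String)) :
    List (List (String × String)) × List (List (String × String)) × List (List (String × String)) × List (List (String × String)) :=
  let s := scoreB ch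
  if s = 3 then (b.1 ++ [ch], b.2.1, b.2.2.1, b.2.2.2)
  else if s = 2 then (b.1, b.2.1 ++ [ch], b.2.2.1, b.2.2.2)
  else if s = 1 then (b.1, b.2.1, b.2.2.1 ++ [ch], b.2.2.2)
  else (b.1, b.2.1, b.2.2.1, b.2.2.2 ++ [ch])

-- buckets[3], buckets[2], buckets[1], buckets[0], each in original order
def bucketsB (chunks : List (List (String × String))) :
    List (List (String × String)) × List (List (String × String)) × List (List (String × String)) × List (List (String × String)) :=
  chunks.foldl stepB ([], [], [], [])

-- 'if t: pieces.append(t)' over the ranked chunks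
def stripOpt (ch : List (String × String)) : Option String :=
  let t := PySem.Str.strip (PySem.Dict.getD (PySem.Dict.mk ch) "text" "")
  if t = "" then none else some t

-- B's packing: build cat front-to-back, cut off at the first overflow
def packB (budget jlen : Int) : List String → Int → List String
  | [], _ => []
  | t :: rest, cur =>
      if budget < cur + PySem.Str.len t + jlen then []
      else t :: packB budget jlen rest (cur + PySem.Str.len t + jlen)

def pick_spans_py_alt (full_text : String) (chunks : List (List (String × String))) (budget_chars : Int) : String :=
  let joiner := "\n\n---\n\n"
  let b := bucketsB chunks
  let pieces := (b.1 ++ b.2.1 ++ b.2.2.1 ++ b.2.2.2).filterMap stripOpt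
  let cat := packB budget_chars (PySem.Str.len joiner) pieces 0
  if cat = [] then PySem.Str.slice full_text none (some budget_chars)
  else PySem.Str.join joiner cat

-- ===== PRECONDITION & SPEC =====
def Spec_pick_spans_py (full_text : String) (chunks : List (List (String × String))) (budget_chars : Int) (out : String) : Prop := out = pick_spans_py_alt full_text chunks budget_chars
instance (full_text : String) (chunks : List (List (String × String))) (budget_chars : Int) (out : String) : Decidable (Spec_pick_spans_py full_text chunks budget_chars out) := by unfold Spec_pick_spans_py; infer_instance

-- ===== CLAIM (what is proved, stated in full; the proofs are below) =====
def Claim_equal_pick_spans_py : Prop := ∀ (full_text : String) (chunks : List (List (String × String))) (budget_chars : Int), Dom_pick_spans_py full_text chunks budget_chars → Spec_pick_spans_py full_text chunks budget_chars (pick_spans_py full_text chunks budget_chars)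

-- ===== LEMMAS AND PROOFS =====
theorem scoreB_eq (c : List (String × String)) : scoreB c = scoreA c := rfl

theorem scoreA_bounds (c : List (String × String)) : 0 ≤ scoreA c ∧ scoreA c ≤ 3 := by
  simp only [scoreA, List.map, List.sum_cons, List.sum_nil]
  split_ifs <;> omega

-- the chunks of score i, in original order
def fS (i : Int) (l : List (List (String × String))) : List (List (String × String)) :=
  l.filter (fun c => scoreA c == i)

theorem fS_mem {i : Int} {y : List (String × String)} {l : List (List (String × String))}
    (hy : y ∈ fS i l) : scoreA y = i := by
  simp only [fS, List.mem_filter, beq_iff_eq] at hy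
  exact hy.2

theorem insertBy_middle (before : List (String × String) → List (String × String) → Bool)
    (x : List (String × String)) (pre suf : List (List (String × String)))
    (hpre : ∀ y ∈ pre, before x y = false) (hsuf : ∀ y ∈ suf, before x y = true) :
    PySem.List.insertBy before x (pre ++ suf) = pre ++ x :: suf := by
  induction pre with
  | nil =>
      cases suf with
      | nil => rfl
      | cons z zs =>
          simp only [List.nil_append, PySem.List.insertBy, hsuf z (by simp)]
          simp
  | cons p ps ih =>
      have hp : before x p = false := hpre p (by simp)
      simp only [List.cons_append, PySem.List.insertBy, hp]
      simp only [Bool.false_eq_true, if_false]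
      rw [ih (fun y hy => hpre y (by simp [hy]))]

theorem sorted_eq_buckets (chunks : List (List (String × String))) :
    PySem.List.sorted chunks scoreA true = fS 3 chunks ++ fS 2 chunks ++ fS 1 chunks ++ fS 0 chunks := by
  rw [PySem.List.sorted_rev_eq_foldl_insertBy]
  induction chunks using List.reverseRecOn with
  | nil => rfl
  | append_singleton ys x ih =>
      rw [List.foldl_append, List.foldl_cons, List.foldl_nil, ih]
      have hb := scoreA_bounds x
      have hx : scoreA x = 0 ∨ scoreA x = 1 ∨ scoreA x = 2 ∨ scoreA x = 3 := by omega
      have hfs : ∀ (i : Int), fS i (ys ++ [x]) = fS i ys ++ (if scoreA x = i then [x] else []) := by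
        intro i
        simp only [fS, List.filter_append, List.filter_cons, List.filter_nil]
        split_ifs with h <;> simp_all
      rcases hx with h | h | h | h <;> simp only [hfs, h] <;> norm_num
      · -- score 0: x goes after everything
        rw [show fS 3 ys ++ (fS 2 ys ++ (fS 1 ys ++ fS 0 ys))
              = (fS 3 ys ++ (fS 2 ys ++ (fS 1 ys ++ fS 0 ys))) ++ ([] : List (List (String × String))) from by simp,
            insertBy_middle _ x _ []
              (by intro y hy
                  simp only [List.mem_append] at hy
                  rcases hy with hy | hy | hy | hy <;>
                    [have := fS_mem hy; have := fS_mem hy; have := fS_mem hy; have := fS_mem hy] <;>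
                    simp [h, this])
              (by intro y hy; simp at hy)]
        simp
      · -- score 1
        rw [show fS 3 ys ++ (fS 2 ys ++ (fS 1 ys ++ fS 0 ys))
              = (fS 3 ys ++ fS 2 ys ++ fS 1 ys) ++ fS 0 ys from by simp,
            insertBy_middle _ x _ _
              (by intro y hy
                  simp only [List.append_assoc, List.mem_append] at hy
                  rcases hy with hy | hy | hy <;>
                    [have := fS_mem hy; have := fS_mem hy; have := fS_mem hy] <;>
                    simp [h, this])
              (by intro y hy; have := fS_mem hy; simp [h, this])]
        simp
      · -- score 2
        rw [show fS 3 ys ++ (fS 2 ys ++ (fS 1 ys ++ fS 0 ys))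
              = (fS 3 ys ++ fS 2 ys) ++ (fS 1 ys ++ fS 0 ys) from by simp,
            insertBy_middle _ x _ _
              (by intro y hy
                  simp only [List.mem_append] at hy
                  rcases hy with hy | hy <;>
                    [have := fS_mem hy; have := fS_mem hy] <;>
                    simp [h, this])
              (by intro y hy
                  simp only [List.mem_append] at hy
                  rcases hy with hy | hy <;>
                    [have := fS_mem hy; have := fS_mem hy] <;>
                    simp [h, this])]
        simp
      · -- score 3
        rw [insertBy_middle _ x (fS 3 ys) (fS 2 ys ++ (fS 1 ys ++ fS 0 ys))
              (by intro y hy; have := fS_mem hy; simp [h, this])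
              (by intro y hy
                  simp only [List.mem_append] at hy
                  rcases hy with hy | hy | hy <;>
                    [have := fS_mem hy; have := fS_mem hy; have := fS_mem hy] <;>
                    simp [h, this])]

theorem bucketsB_eq (chunks : List (List (String × String))) :
    bucketsB chunks = (fS 3 chunks, fS 2 chunks, fS 1 chunks, fS 0 chunks) := by
  have key : ∀ (l : List (List (String × String)))
      (b : List (List (String × String)) × List (List (String × String)) × List (List (String × String)) × List (List (String × String))),
      l.foldl stepB b = (b.1 ++ fS 3 l, b.2.1 ++ fS 2 l, b.2.2.1 ++ fS 1 l, b.2.2.2 ++ fS 0 l) := by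
    intro l
    induction l with
    | nil => intro b; simp [fS]
    | cons ch rest ih =>
        intro b
        have hb := scoreA_bounds ch
        have hx : scoreA ch = 0 ∨ scoreA ch = 1 ∨ scoreA ch = 2 ∨ scoreA ch = 3 := by omega
        have hfs : ∀ (i : Int), fS i (ch :: rest) = (if scoreA ch = i then [ch] else []) ++ fS i rest := by
          intro i
          simp only [fS, List.filter_cons]
          split_ifs with h <;> simp_all
        rw [List.foldl_cons]
        rcases hx with h | h | h | h
        · rw [show stepB b ch = (b.1, b.2.1, b.2.2.1, b.2.2.2 ++ [ch]) from by
                simp [stepB, scoreB_eq, h], ih]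
          simp [hfs, h]
        · rw [show stepB b ch = (b.1, b.2.1, b.2.2.1 ++ [ch], b.2.2.2) from by
                simp [stepB, scoreB_eq, h], ih]
          simp [hfs, h]
        · rw [show stepB b ch = (b.1, b.2.1 ++ [ch], b.2.2.1, b.2.2.2) from by
                simp [stepB, scoreB_eq, h], ih]
          simp [hfs, h]
        · rw [show stepB b ch = (b.1 ++ [ch], b.2.1, b.2.2.1, b.2.2.2) from by
                simp [stepB, scoreB_eq, h], ih]
          simp [hfs, h]
  rw [bucketsB, key]
  simp

theorem pack_bridge (budget jlen : Int) (l : List (List (String × String)))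
    (cat : List String) (cur : Int) :
    packA budget jlen l cat cur = cat ++ packB budget jlen (l.filterMap stripOpt) cur := by
  induction l generalizing cat cur with
  | nil => simp [packA, packB]
  | cons ch rest ih =>
      by_cases ht : PySem.Str.strip (PySem.Dict.getD (PySem.Dict.mk ch) "text" "") = ""
      · have h1 : stripOpt ch = none := by simp [stripOpt, ht]
        rw [show packA budget jlen (ch :: rest) cat cur = packA budget jlen rest cat cur from by
              simp only [packA]; rw [if_pos ht],
            List.filterMap_cons, h1]
        exact ih cat cur
      · have h1 : stripOpt ch = some (PySem.Str.strip (PySem.Dict.getD (PySem.Dict.mk ch) "text" "")) := by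
          simp [stripOpt, ht]
        rw [List.filterMap_cons, h1]
        by_cases hov : budget < cur + PySem.Str.len (PySem.Str.strip (PySem.Dict.getD (PySem.Dict.mk ch) "text" "")) + jlen
        · rw [show packA budget jlen (ch :: rest) cat cur = cat from by
                simp only [packA]; rw [if_neg ht, if_pos hov],
              show packB budget jlen (PySem.Str.strip (PySem.Dict.getD (PySem.Dict.mk ch) "text" "") :: rest.filterMap stripOpt) cur = [] from by
                simp only [packB]; rw [if_pos hov]]
          simp
        · rw [show packA budget jlen (ch :: rest) cat cur
                = packA budget jlen rest (cat ++ [PySem.Str.strip (PySem.Dict.getD (PySem.Dict.mk ch) "text" "")])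
                    (cur + PySem.Str.len (PySem.Str.strip (PySem.Dict.getD (PySem.Dict.mk ch) "text" "")) + jlen) from by
                simp only [packA]; rw [if_neg ht, if_neg hov],
              show packB budget jlen (PySem.Str.strip (PySem.Dict.getD (PySem.Dict.mk ch) "text" "") :: rest.filterMap stripOpt) cur
                = PySem.Str.strip (PySem.Dict.getD (PySem.Dict.mk ch) "text" "")
                    :: packB budget jlen (rest.filterMap stripOpt)
                        (cur + PySem.Str.len (PySem.Str.strip (PySem.Dict.getD (PySem.Dict.mk ch) "text" "")) + jlen) from by
                simp only [packB]; rw [if_neg hov],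
              ih]
          simp

-- ===== VERDICT (by name: the statement is the Claim_ definition above) =====
theorem pick_spans_py_spec : Claim_equal_pick_spans_py := by
  intro full_text chunks budget_chars _
  show pick_spans_py full_text chunks budget_chars = pick_spans_py_alt full_text chunks budget_chars
  simp only [pick_spans_py, pick_spans_py_alt, sorted_eq_buckets, bucketsB_eq, pack_bridge,
    List.nil_append, List.append_assoc]
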